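-- pv_equiv track=rewrite | github.com/loscharld/DADI-BERT-NER | bert_similarity_calculation_jingyou.py | pailiang_judge
-- ===== SOURCE A (Python) =====
-- def pailiang_judge(pailiang_list,content_pailiang_list):
--     '''判断排量标准是否包含全部包含返回True否则返回False'''
--     count=0
--     for pl in pailiang_list:
--         if pl in list(set(content_pailiang_list)):
--             count+=1
--         else:
--             continue
--     if count==len(list(set(content_pailiang_list))):
--         return True
--     else:
--         return False
-- ===== SOURCE B (Python) =====
-- def pailiang_judge(pailiang_list, content_pailiang_list):
--     '''判断排量标准是否包含全部包含返回True否则返回False'''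
--     freq = {}
--     for pl in pailiang_list:
--         freq[pl] = freq.get(pl, 0) + 1
--     distinct = set(content_pailiang_list)
--     total = sum(freq.get(v, 0) for v in distinct)
--     return total == len(distinct)
-- ===== Notes on version B (the rewrite author's own statement) =====
-- stated objective: faster
-- what changed: B builds a frequency table of pailiang_list once and then iterates over the distinct content values, summing their frequencies, instead of A's loop over pailiang_list with a membership test against set(content) rebuilt each iteration; the sum of frequencies over the distinct set equals A's multiplicity count.
import Mathlib
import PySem

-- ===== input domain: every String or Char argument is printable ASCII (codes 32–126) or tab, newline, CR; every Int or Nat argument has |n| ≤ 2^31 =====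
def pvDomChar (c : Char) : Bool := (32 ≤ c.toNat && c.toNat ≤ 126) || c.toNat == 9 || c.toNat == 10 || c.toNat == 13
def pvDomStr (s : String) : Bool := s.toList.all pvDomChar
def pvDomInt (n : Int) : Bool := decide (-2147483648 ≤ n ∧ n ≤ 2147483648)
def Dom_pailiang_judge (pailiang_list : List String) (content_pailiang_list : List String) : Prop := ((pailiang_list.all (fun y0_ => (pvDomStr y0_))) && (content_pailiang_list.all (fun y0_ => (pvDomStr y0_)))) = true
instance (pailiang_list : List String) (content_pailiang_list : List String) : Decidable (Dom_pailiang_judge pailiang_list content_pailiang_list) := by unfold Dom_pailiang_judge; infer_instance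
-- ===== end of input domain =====

-- B builds a frequency table of pailiang_list once and sums frequencies over the distinct
-- content values, instead of A's membership-testing loop over pailiang_list (alternative).

-- ===== PORT A =====
def pailiang_judge (pailiang_list : List String) (content_pailiang_list : List String) : Bool :=
  let count : Int := pailiang_list.foldl
    (fun count pl =>
      if (PySem.Set.ofList content_pailiang_list).contains pl then count + 1 else count) 0
  if count = (PySem.Set.len (PySem.Set.ofList content_pailiang_list) : Int) then true else false

-- ===== PORT B =====
def pailiang_judge_alt (pailiang_list : List String) (content_pailiang_list : List String) : Bool :=
  let freq : PySem.Dict String Int :=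
    pailiang_list.foldl (fun d pl => d.insert pl (d.getD pl 0 + 1)) PySem.Dict.empty
  let distinct : PySem.Set String := PySem.Set.ofList content_pailiang_list
  let total : Int := distinct.foldl (fun acc v => acc + freq.getD v 0) 0
  decide (total = (PySem.Set.len distinct : Int))

-- ===== PRECONDITION & SPEC =====
def Spec_pailiang_judge (pailiang_list : List String) (content_pailiang_list : List String) (out : Bool) : Prop := out = pailiang_judge_alt pailiang_list content_pailiang_list
instance (pailiang_list : List String) (content_pailiang_list : List String) (out : Bool) : Decidable (Spec_pailiang_judge pailiang_list content_pailiang_list out) := by unfold Spec_pailiang_judge; infer_instance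

-- ===== CLAIM (what is proved, stated in full; the proofs are below) =====
def Claim_equal_pailiang_judge : Prop := ∀ (pailiang_list : List String) (content_pailiang_list : List String), Dom_pailiang_judge pailiang_list content_pailiang_list → Spec_pailiang_judge pailiang_list content_pailiang_list (pailiang_judge pailiang_list content_pailiang_list)

-- ===== LEMMAS AND PROOFS =====

-- A's loop is the length of the filter of pailiang_list by membership in S
theorem foldl_count_mem (S : PySem.Set String) :
    ∀ (p : List String) (acc : Int),
      p.foldl (fun count pl => if S.contains pl then count + 1 else count) acc
        = acc + ((p.filter (fun x => S.contains x)).length : Int) := by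
  intro p
  induction p with
  | nil => intro acc; simp
  | cons a p ih =>
    intro acc
    rw [List.foldl_cons, List.filter_cons]
    by_cases h : S.contains a = true
    · rw [if_pos h, if_pos h, ih, List.length_cons]; push_cast; ring
    · rw [if_neg h, if_neg h, ih]

-- B's sum loop is the sum of the counts
theorem foldl_sum_counts (p : List String) :
    ∀ (S : List String) (acc : Int),
      S.foldl (fun acc v => acc + (p.count v : Int)) acc
        = acc + ((S.map (fun v => (p.count v : Int))).sum) := by
  intro S
  induction S with
  | nil => intro acc; simp
  | cons v S ih =>
    intro acc
    rw [List.foldl_cons, ih, List.map_cons, List.sum_cons]; ring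

-- splitting the filter by a fresh head element of S
theorem length_filter_cons_mem (v : String) (S : List String) (hv : v ∉ S) :
    ∀ (p : List String),
      (p.filter (fun x => (v :: S).contains x)).length
        = p.count v + (p.filter (fun x => S.contains x)).length := by
  intro p
  induction p with
  | nil => simp
  | cons a p ih =>
    rw [List.filter_cons, List.filter_cons, List.count_cons]
    have hcc : ((v :: S).contains a) = (a == v || S.contains a) := by
      rw [List.contains_cons]
    rw [hcc]
    cases hav : (a == v) <;> cases ham : S.contains a
    · simp at ih ⊢; omega
    · simp at ih ⊢; omega
    · have hav' : a = v := eq_of_beq hav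
      simp [hav'] at ih ⊢; omega
    · exact absurd (by simpa [List.contains_eq_mem, eq_of_beq hav] using ham) hv

-- for a Nodup S, the sum of counts equals the filtered length
theorem sum_counts_eq_length_filter (p : List String) :
    ∀ (S : List String), S.Nodup →
      ((S.map (fun v => (p.count v : Int))).sum)
        = ((p.filter (fun x => S.contains x)).length : Int) := by
  intro S
  induction S with
  | nil => simp
  | cons v S ih =>
    intro hnd
    rcases List.nodup_cons.mp hnd with ⟨hv, hnd'⟩
    rw [List.map_cons, List.sum_cons, ih hnd', length_filter_cons_mem v S hv p]
    push_cast
    ring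

-- B's frequency dict is Counter(pailiang_list), so its lookups are counts
theorem freq_getD (p : List String) (v : String) :
    (p.foldl (fun d pl => d.insert pl (d.getD pl 0 + 1)) PySem.Dict.empty).getD v 0
      = (p.count v : Int) := by
  rw [PySem.Dict.foldl_insert_getD_add_one_eq_counter, PySem.Dict.getD_counter]

-- ===== VERDICT (by name: the statement is the Claim_ definition above) =====
theorem pailiang_judge_spec : Claim_equal_pailiang_judge := by
  intro p c _
  unfold Spec_pailiang_judge
  simp only [pailiang_judge, pailiang_judge_alt]
  have hfun : (fun (acc : Int) v =>
      acc + (p.foldl (fun d pl => d.insert pl (d.getD pl 0 + 1)) PySem.Dict.empty).getD v 0)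
      = fun (acc : Int) v => acc + (p.count v : Int) := by
    funext acc v; rw [freq_getD]
  rw [foldl_count_mem (PySem.Set.ofList c) p 0, hfun, foldl_sum_counts p (PySem.Set.ofList c) 0,
    sum_counts_eq_length_filter p (PySem.Set.ofList c) (PySem.Set.nodup_ofList c)]
  by_cases h : (0 : Int) + ((p.filter (fun x => (PySem.Set.ofList c).contains x)).length : Int)
      = (PySem.Set.len (PySem.Set.ofList c) : Int)
  · rw [if_pos h]; exact (decide_eq_true h).symm
  · rw [if_neg h]; exact (decide_eq_false h).symm
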